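-- pv_equiv track=rewrite | github.com/preke/Prompt-Personality | fine_tune_src/data_loader.py | few_shot_sampler
-- ===== SOURCE A (Python) =====
-- def few_shot_sampler(uttrs, labels, uttr_masks, few_shot):
--     pos                 = 0
--     neg                 = 0
--     few_shot_uttrs      = []
--     few_shot_labels     = []
--     few_shot_uttr_masks = []
--
--     for i in range(len(labels)):
--         if labels[i] == 1 and pos < few_shot:
--             few_shot_uttrs.append(uttrs[i])
--             few_shot_labels.append(labels[i])
--             few_shot_uttr_masks.append(uttr_masks[i])
--             pos += 1
--         elif labels[i] == 0 and neg < few_shot: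
--             few_shot_uttrs.append(uttrs[i])
--             few_shot_labels.append(labels[i])
--             few_shot_uttr_masks.append(uttr_masks[i])
--             neg += 1
--
--         if pos >= few_shot and neg >= few_shot:
--             break
--     return few_shot_uttrs, few_shot_labels, few_shot_uttr_masks
-- ===== SOURCE B (Python) =====
-- def few_shot_sampler(uttrs, labels, uttr_masks, few_shot):
--     k = max(few_shot, 0)
--     pos_idx = [i for i in range(len(labels)) if labels[i] == 1][:k]
--     neg_idx = [i for i in range(len(labels)) if labels[i] == 0][:k]
--     selected = sorted(pos_idx + neg_idx)
--     few_shot_uttrs = [uttrs[i] for i in selected]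
--     few_shot_labels = [labels[i] for i in selected]
--     few_shot_uttr_masks = [uttr_masks[i] for i in selected]
--     return few_shot_uttrs, few_shot_labels, few_shot_uttr_masks
-- ===== Notes on version B (the rewrite author's own statement) =====
-- stated objective: simpler
-- what changed: Replaced the interleaved two-counter accumulate-and-break loop by a two-stage decomposition: collect the indices of the first few_shot positives and the first few_shot negatives, merge and sort them, then gather uttrs/labels/uttr_masks by those indices.
import Mathlib
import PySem

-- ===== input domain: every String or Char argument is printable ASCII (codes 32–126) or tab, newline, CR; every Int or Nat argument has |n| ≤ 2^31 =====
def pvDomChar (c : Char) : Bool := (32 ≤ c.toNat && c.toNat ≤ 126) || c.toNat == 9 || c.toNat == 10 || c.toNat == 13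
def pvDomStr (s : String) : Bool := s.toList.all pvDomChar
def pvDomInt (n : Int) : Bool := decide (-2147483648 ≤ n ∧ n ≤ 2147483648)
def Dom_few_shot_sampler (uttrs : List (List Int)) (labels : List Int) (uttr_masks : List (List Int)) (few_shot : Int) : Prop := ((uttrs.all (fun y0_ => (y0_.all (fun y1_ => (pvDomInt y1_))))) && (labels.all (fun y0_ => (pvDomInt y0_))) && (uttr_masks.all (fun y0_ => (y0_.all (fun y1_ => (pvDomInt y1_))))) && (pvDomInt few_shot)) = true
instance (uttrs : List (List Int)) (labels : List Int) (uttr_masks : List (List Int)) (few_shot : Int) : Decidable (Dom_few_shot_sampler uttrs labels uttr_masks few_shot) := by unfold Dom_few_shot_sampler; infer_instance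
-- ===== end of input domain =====

-- B replaces A's interleaved two-counter accumulate-and-break loop by a simpler decomposition:
-- collect the first few_shot positive and negative indices, sort the merged index list, gather.

-- ===== PORT A =====
-- the loop body of A over the remaining indices of range(len(labels)), with state (pos, neg) and
-- the three accumulators; 'break' is the early return, 'return' is reaching the end of the index list
def fssA_go (uttrs : List (List Int)) (labels : List Int) (uttr_masks : List (List Int)) (few_shot : Int) :
    List Int → Int → Int → List (List Int) → List Int → List (List Int) →
    List (List Int) × List Int × List (List Int)
  | [], _, _, fu, fl, fm => (fu, fl, fm)
  | i :: rest, pos, neg, fu, fl, fm =>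
    if PySem.List.pyGetD labels i 0 = 1 ∧ pos < few_shot then
      -- appends are total only on Pre_ (in-range index); Python raises IndexError otherwise
      let fu' := fu ++ [PySem.List.pyGetD uttrs i []]
      let fl' := fl ++ [PySem.List.pyGetD labels i 0]
      let fm' := fm ++ [PySem.List.pyGetD uttr_masks i []]
      if pos + 1 ≥ few_shot ∧ neg ≥ few_shot then (fu', fl', fm')
      else fssA_go uttrs labels uttr_masks few_shot rest (pos + 1) neg fu' fl' fm'
    else if PySem.List.pyGetD labels i 0 = 0 ∧ neg < few_shot then
      let fu' := fu ++ [PySem.List.pyGetD uttrs i []]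
      let fl' := fl ++ [PySem.List.pyGetD labels i 0]
      let fm' := fm ++ [PySem.List.pyGetD uttr_masks i []]
      if pos ≥ few_shot ∧ neg + 1 ≥ few_shot then (fu', fl', fm')
      else fssA_go uttrs labels uttr_masks few_shot rest pos (neg + 1) fu' fl' fm'
    else if pos ≥ few_shot ∧ neg ≥ few_shot then (fu, fl, fm)
    else fssA_go uttrs labels uttr_masks few_shot rest pos neg fu fl fm

def few_shot_sampler (uttrs : List (List Int)) (labels : List Int) (uttr_masks : List (List Int)) (few_shot : Int) : List (List Int) × List Int × List (List Int) :=
  fssA_go uttrs labels uttr_masks few_shot (PySem.List.pyRange 0 (labels.length : Int) 1) 0 0 [] [] []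

-- ===== PORT B =====
def few_shot_sampler_alt (uttrs : List (List Int)) (labels : List Int) (uttr_masks : List (List Int)) (few_shot : Int) : List (List Int) × List Int × List (List Int) :=
  let k := max few_shot 0
  -- xs[:k] with k = max(few_shot, 0) ≥ 0 is exactly take k
  let pos_idx := ((PySem.List.pyRange 0 (labels.length : Int) 1).filter
      (fun i => PySem.List.pyGetD labels i 0 == 1)).take k.toNat
  let neg_idx := ((PySem.List.pyRange 0 (labels.length : Int) 1).filter
      (fun i => PySem.List.pyGetD labels i 0 == 0)).take k.toNat
  let selected := PySem.List.sorted (pos_idx ++ neg_idx) (fun i => i) false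
  (selected.map (fun i => PySem.List.pyGetD uttrs i []),
   selected.map (fun i => PySem.List.pyGetD labels i 0),
   selected.map (fun i => PySem.List.pyGetD uttr_masks i []))

-- ===== PRECONDITION & SPEC =====
-- Pre_ excludes exactly the inputs where the Python A raises IndexError: a selected index
-- (label 1 or 0 whose like-labelled predecessors number fewer than few_shot) that is out of
-- range for uttrs or uttr_masks.
def Pre_few_shot_sampler (uttrs : List (List Int)) (labels : List Int) (uttr_masks : List (List Int)) (few_shot : Int) : Prop :=
  ∀ i < labels.length,
    ((labels.getD i 0 = 1 ∧ ((labels.take i).count 1 : Int) < few_shot) ∨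
     (labels.getD i 0 = 0 ∧ ((labels.take i).count 0 : Int) < few_shot)) →
    i < uttrs.length ∧ i < uttr_masks.length
instance (uttrs : List (List Int)) (labels : List Int) (uttr_masks : List (List Int)) (few_shot : Int) : Decidable (Pre_few_shot_sampler uttrs labels uttr_masks few_shot) := by unfold Pre_few_shot_sampler; infer_instance

def pvWitness_few_shot_sampler : List (List Int) × List Int × List (List Int) × Int :=
  ([[1], [2], [3], [4]], [1, 0, 2, 1], [[5], [6], [7], [8]], 1)

def Spec_few_shot_sampler (uttrs : List (List Int)) (labels : List Int) (uttr_masks : List (List Int)) (few_shot : Int) (out : List (List Int) × List Int × List (List Int)) : Prop := out = few_shot_sampler_alt uttrs labels uttr_masks few_shot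
instance (uttrs : List (List Int)) (labels : List Int) (uttr_masks : List (List Int)) (few_shot : Int) (out : List (List Int) × List Int × List (List Int)) : Decidable (Spec_few_shot_sampler uttrs labels uttr_masks few_shot out) := by unfold Spec_few_shot_sampler; infer_instance

-- ===== CLAIM (what is proved, stated in full; the proofs are below) =====
def Claim_equal_few_shot_sampler : Prop := ∀ (uttrs : List (List Int)) (labels : List Int) (uttr_masks : List (List Int)) (few_shot : Int), Dom_few_shot_sampler uttrs labels uttr_masks few_shot → Pre_few_shot_sampler uttrs labels uttr_masks few_shot → Spec_few_shot_sampler uttrs labels uttr_masks few_shot (few_shot_sampler uttrs labels uttr_masks few_shot)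

-- ===== LEMMAS AND PROOFS =====

-- the selection predicate both programs realize: index i is kept iff its label is 1 (resp. 0)
-- and fewer than few_shot like-labelled indices precede it
def selB (labels : List Int) (fs : Int) (i : Nat) : Bool :=
  (labels.getD i 0 == 1 && decide (((labels.take i).count 1 : Int) < fs)) ||
  (labels.getD i 0 == 0 && decide (((labels.take i).count 0 : Int) < fs))

theorem count_take_mono (l : List Int) (v : Int) {a b : Nat} (h : a ≤ b) :
    (l.take a).count v ≤ (l.take b).count v := by
  have he : l.take a = (l.take b).take a := by rw [List.take_take, min_eq_left h]
  rw [he]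
  exact (List.take_sublist _ _).count_le _

theorem count_take_succ (l : List Int) {a : Nat} (ha : a < l.length) (v : Int) :
    (l.take (a+1)).count v = (l.take a).count v + (if l.getD a 0 = v then 1 else 0) := by
  rw [List.take_succ, List.getElem?_eq_getElem ha, List.count_append,
      List.getD_eq_getElem l 0 ha]
  simp [List.count_cons]

theorem selB_nil (labels : List Int) (fs : Int) {a : Nat} (s m : Nat) (has : a ≤ s)
    (h1 : fs ≤ (((labels.take a).count 1 : Nat) : Int))
    (h0 : fs ≤ (((labels.take a).count 0 : Nat) : Int)) :
    (List.range' s m).filter (selB labels fs) = [] := by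
  rw [List.filter_eq_nil_iff]
  intro i hi hsel
  have hai : a ≤ i := le_trans has (List.mem_range'_1.mp hi).1
  have m1 := count_take_mono labels 1 hai
  have m0 := count_take_mono labels 0 hai
  simp only [selB, Bool.or_eq_true, Bool.and_eq_true, beq_iff_eq, decide_eq_true_eq] at hsel
  rcases hsel with ⟨_, h⟩ | ⟨_, h⟩ <;> omega

-- take k of a filtered index list = filter with a "fewer than k like elements before" bound
theorem filt_take (labels : List Int) (v : Int) :
    ∀ (m a k : Nat), a + m ≤ labels.length →
    ((List.range' a m).filter (fun i => labels.getD i 0 == v)).take k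
    = (List.range' a m).filter
        (fun i => labels.getD i 0 == v &&
          decide ((labels.take i).count v < (labels.take a).count v + k)) := by
  intro m
  induction m with
  | zero => intro a k _; simp
  | succ m ih =>
    intro a k hlen
    have ha : a < labels.length := by omega
    rw [List.range'_succ]
    by_cases hv : labels.getD a 0 = v
    · have hstep : (labels.take (a+1)).count v = (labels.take a).count v + 1 := by
        rw [count_take_succ labels ha v, if_pos hv]
      cases k with
      | zero =>
        simp only [List.take_zero]
        symm
        rw [List.filter_eq_nil_iff]
        intro i hi hsel
        simp only [Bool.and_eq_true, beq_iff_eq, decide_eq_true_eq] at hsel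
        rcases List.mem_cons.mp hi with rfl | hi'
        · omega
        · have hai : a + 1 ≤ i := (List.mem_range'_1.mp hi').1
          have := count_take_mono labels v (le_of_lt hai)
          omega
      | succ k' =>
        rw [List.filter_cons, List.filter_cons,
            if_pos (show (labels.getD a 0 == v) = true by simp only [beq_iff_eq]; exact hv),
            if_pos (show _ = true by
              simp only [Bool.and_eq_true, beq_iff_eq, decide_eq_true_eq]
              exact ⟨hv, by omega⟩),
            List.take_succ_cons, ih (a+1) k' (by omega)]
        congr 1
        apply List.filter_congr
        intro i hi
        have hai : a + 1 ≤ i := (List.mem_range'_1.mp hi).1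
        have := count_take_mono labels v hai
        by_cases hiv : labels.getD i 0 = v
        · simp only [hiv, beq_self_eq_true, Bool.true_and]
          rw [decide_eq_decide]
          omega
        · have hb : (labels.getD i 0 == v) = false := by
            simp only [beq_eq_false_iff_ne, ne_eq]; exact hiv
          rw [hb, Bool.false_and, Bool.false_and]
    · have hstep : (labels.take (a+1)).count v = (labels.take a).count v := by
        rw [count_take_succ labels ha v, if_neg hv]; omega
      rw [List.filter_cons, List.filter_cons,
          if_neg (show ¬ (labels.getD a 0 == v) = true by simp only [beq_iff_eq]; exact hv),
          if_neg (show ¬ _ = true by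
            simp only [Bool.and_eq_true, beq_iff_eq, decide_eq_true_eq]
            exact fun h => hv h.1),
          ih (a+1) k (by omega), hstep]

theorem filter_or_perm {α : Type} (p q : α → Bool) :
    ∀ (xs : List α), (∀ x ∈ xs, ¬(p x = true ∧ q x = true)) →
    (xs.filter p ++ xs.filter q).Perm (xs.filter (fun x => p x || q x)) := by
  intro xs
  induction xs with
  | nil => intro _; simp
  | cons x xs ih =>
    intro hdisj
    have ih' := ih (fun y hy => hdisj y (List.mem_cons_of_mem x hy))
    by_cases hp : p x = true
    · have hq : ¬ q x = true := fun h => hdisj x (List.mem_cons_self) ⟨hp, h⟩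
      rw [List.filter_cons_of_pos hp, List.filter_cons_of_neg (by simpa using hq),
          List.filter_cons_of_pos (by simp [hp]), List.cons_append]
      exact ih'.cons x
    · by_cases hq : q x = true
      · rw [List.filter_cons_of_neg (by simpa using hp), List.filter_cons_of_pos hq,
            List.filter_cons_of_pos (by simp [hq])]
        exact (List.perm_middle).trans (ih'.cons x)
      · rw [List.filter_cons_of_neg (by simpa using hp),
            List.filter_cons_of_neg (by simpa using hq),
            List.filter_cons_of_neg (by simp [hp, hq])]
        exact ih'

-- the common index list both sides gather from
theorem idx_eq (labels : List Int) (fs v : Int) :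
    ((PySem.List.pyRange 0 (labels.length : Int) 1).filter
        (fun i => PySem.List.pyGetD labels i 0 == v)).take (max fs 0).toNat
    = List.map (fun k : Nat => (k : Int))
        ((List.range labels.length).filter
          (fun i => labels.getD i 0 == v && decide ((((labels.take i).count v : Nat) : Int) < fs))) := by
  rw [PySem.List.pyRange_zero_natCast, List.filter_map,
      List.filter_congr (fun x _ => by
        show ((fun i => PySem.List.pyGetD labels i 0 == v) ∘ (fun k : Nat => (k : Int))) x
            = (fun i : Nat => labels.getD i 0 == v) x
        simp [Function.comp, PySem.List.pyGetD_natCast]),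
      ← List.map_take, List.range_eq_range',
      filt_take labels v labels.length 0 (max fs 0).toNat (by omega)]
  congr 1
  apply List.filter_congr
  intro i _
  by_cases hiv : labels.getD i 0 = v
  · simp only [hiv, beq_self_eq_true, Bool.true_and]
    rw [decide_eq_decide]
    simp only [List.take_zero, List.count_nil, Nat.zero_add]
    omega
  · have hb : (labels.getD i 0 == v) = false := by
      simp only [beq_eq_false_iff_ne, ne_eq]; exact hiv
    rw [hb, Bool.false_and, Bool.false_and]

-- B computes the gather over the selB-selected indices
theorem alt_eq (uttrs : List (List Int)) (labels : List Int) (uttr_masks : List (List Int))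
    (fs : Int) :
    few_shot_sampler_alt uttrs labels uttr_masks fs =
    (((List.range labels.length).filter (selB labels fs)).map (fun i => uttrs.getD i []),
     ((List.range labels.length).filter (selB labels fs)).map (fun i => labels.getD i 0),
     ((List.range labels.length).filter (selB labels fs)).map (fun i => uttr_masks.getD i [])) := by
  unfold few_shot_sampler_alt
  dsimp only
  rw [idx_eq labels fs 1, idx_eq labels fs 0, ← List.map_append]
  have hperm : ((List.range labels.length).filter
        (fun i => labels.getD i 0 == 1 && decide ((((labels.take i).count 1 : Nat) : Int) < fs))
      ++ (List.range labels.length).filter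
        (fun i => labels.getD i 0 == 0 && decide ((((labels.take i).count 0 : Nat) : Int) < fs))).Perm
      ((List.range labels.length).filter (selB labels fs)) := by
    have h := filter_or_perm
      (fun i => labels.getD i 0 == 1 && decide ((((labels.take i).count 1 : Nat) : Int) < fs))
      (fun i => labels.getD i 0 == 0 && decide ((((labels.take i).count 0 : Nat) : Int) < fs))
      (List.range labels.length)
      (by
        intro x _ hx
        simp only [Bool.and_eq_true, beq_iff_eq, decide_eq_true_eq] at hx
        have := hx.1.1; have := hx.2.1; omega)
    exact h
  have hpair : (((List.range labels.length).filter (selB labels fs)).map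
      (fun k : Nat => (k : Int))).Pairwise (fun a b => (fun i : Int => i) a < (fun i : Int => i) b) := by
    refine List.Pairwise.map _ (fun a b h => ?_)
      (List.Pairwise.sublist List.filter_sublist List.pairwise_lt_range)
    simpa using (Nat.cast_lt (α := Int)).mpr h
  have hsorted : PySem.List.sorted
      (List.map (fun k : Nat => (k : Int))
        ((List.range labels.length).filter
          (fun i => labels.getD i 0 == 1 && decide ((((labels.take i).count 1 : Nat) : Int) < fs))
        ++ (List.range labels.length).filter
          (fun i => labels.getD i 0 == 0 && decide ((((labels.take i).count 0 : Nat) : Int) < fs))))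
      (fun i : Int => i) false
      = List.map (fun k : Nat => (k : Int)) ((List.range labels.length).filter (selB labels fs)) :=
    PySem.List.sorted_eq_of_perm_of_pairwise_lt _ _ _ (hperm.symm.map _) hpair
  rw [hsorted]
  simp [List.map_map, Function.comp, PySem.List.pyGetD_natCast]

-- A's loop, from index a with correctly-valued counters, appends the gather over the
-- remaining selected indices
theorem fssA_go_eq (uttrs : List (List Int)) (labels : List Int) (uttr_masks : List (List Int))
    (fs : Int) :
    ∀ (m a : Nat) (pos neg : Int) (fu : List (List Int)) (fl : List Int) (fm : List (List Int)),
    a + m = labels.length →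
    pos = min (((labels.take a).count 1 : Nat) : Int) (max fs 0) →
    neg = min (((labels.take a).count 0 : Nat) : Int) (max fs 0) →
    fssA_go uttrs labels uttr_masks fs ((List.range' a m).map (fun i : Nat => (i : Int))) pos neg fu fl fm =
    (fu ++ ((List.range' a m).filter (selB labels fs)).map (fun i => uttrs.getD i []),
     fl ++ ((List.range' a m).filter (selB labels fs)).map (fun i => labels.getD i 0),
     fm ++ ((List.range' a m).filter (selB labels fs)).map (fun i => uttr_masks.getD i [])) := by
  intro m
  induction m with
  | zero =>
    intro a pos neg fu fl fm _ _ _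
    simp [fssA_go]
  | succ m ih =>
    intro a pos neg fu fl fm hlen hpos hneg
    have ha : a < labels.length := by omega
    rw [List.range'_succ, List.map_cons]
    simp only [fssA_go, PySem.List.pyGetD_natCast]
    by_cases h1 : labels.getD a 0 = 1
    · have hcnt1 : (labels.take (a+1)).count 1 = (labels.take a).count 1 + 1 := by
        rw [count_take_succ labels ha 1, if_pos h1]
      have hcnt0 : (labels.take (a+1)).count 0 = (labels.take a).count 0 := by
        rw [count_take_succ labels ha 0, if_neg (by rw [h1]; norm_num)]; omega
      by_cases hp : pos < fs
      · rw [if_pos ⟨h1, hp⟩]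
        have hc1lt : (((labels.take a).count 1 : Nat) : Int) < fs := by omega
        have hsel_a : selB labels fs a = true := by
          simp only [selB, Bool.or_eq_true, Bool.and_eq_true, beq_iff_eq, decide_eq_true_eq]
          exact Or.inl ⟨h1, hc1lt⟩
        rw [List.filter_cons_of_pos hsel_a]
        by_cases hbr : pos + 1 ≥ fs ∧ neg ≥ fs
        · rw [if_pos hbr]
          rw [selB_nil labels fs (a+1) m le_rfl (by rw [hcnt1]; omega) (by rw [hcnt0]; omega)]
          simp
        · rw [if_neg hbr]
          rw [ih (a+1) (pos+1) neg _ _ _ (by omega)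
              (by rw [hcnt1]; push_cast; omega) (by rw [hcnt0]; omega)]
          simp
      · rw [if_neg (fun h => hp h.2)]
        have hc1ge : fs ≤ (((labels.take a).count 1 : Nat) : Int) := by omega
        rw [if_neg (show ¬(labels.getD a 0 = 0 ∧ neg < fs) by
          rintro ⟨h0, _⟩; rw [h1] at h0; norm_num at h0)]
        have hsel_a : ¬ selB labels fs a = true := by
          simp only [selB, Bool.or_eq_true, Bool.and_eq_true, beq_iff_eq, decide_eq_true_eq]
          rintro (⟨_, h⟩ | ⟨h0, _⟩)
          · omega
          · rw [h1] at h0; norm_num at h0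
        rw [List.filter_cons_of_neg hsel_a]
        by_cases hbr : pos ≥ fs ∧ neg ≥ fs
        · rw [if_pos hbr]
          rw [selB_nil labels fs (a+1) m le_rfl (by rw [hcnt1]; omega) (by rw [hcnt0]; omega)]
          simp
        · rw [if_neg hbr]
          exact ih (a+1) pos neg _ _ _ (by omega)
            (by rw [hcnt1]; push_cast; omega) (by rw [hcnt0]; omega)
    · have hcnt1 : (labels.take (a+1)).count 1 = (labels.take a).count 1 := by
        rw [count_take_succ labels ha 1, if_neg h1]; omega
      rw [if_neg (fun h => h1 h.1)]
      by_cases h0 : labels.getD a 0 = 0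
      · have hcnt0 : (labels.take (a+1)).count 0 = (labels.take a).count 0 + 1 := by
          rw [count_take_succ labels ha 0, if_pos h0]
        by_cases hq : neg < fs
        · rw [if_pos ⟨h0, hq⟩]
          have hc0lt : (((labels.take a).count 0 : Nat) : Int) < fs := by omega
          have hsel_a : selB labels fs a = true := by
            simp only [selB, Bool.or_eq_true, Bool.and_eq_true, beq_iff_eq, decide_eq_true_eq]
            exact Or.inr ⟨h0, hc0lt⟩
          rw [List.filter_cons_of_pos hsel_a]
          by_cases hbr : pos ≥ fs ∧ neg + 1 ≥ fs
          · rw [if_pos hbr]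
            rw [selB_nil labels fs (a+1) m le_rfl (by rw [hcnt1]; omega) (by rw [hcnt0]; omega)]
            simp
          · rw [if_neg hbr]
            rw [ih (a+1) pos (neg+1) _ _ _ (by omega)
                (by rw [hcnt1]; omega) (by rw [hcnt0]; push_cast; omega)]
            simp
        · rw [if_neg (fun h => hq h.2)]
          have hc0ge : fs ≤ (((labels.take a).count 0 : Nat) : Int) := by omega
          have hsel_a : ¬ selB labels fs a = true := by
            simp only [selB, Bool.or_eq_true, Bool.and_eq_true, beq_iff_eq, decide_eq_true_eq]
            rintro (⟨hx, _⟩ | ⟨_, h⟩)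
            · rw [h0] at hx; norm_num at hx
            · omega
          rw [List.filter_cons_of_neg hsel_a]
          by_cases hbr : pos ≥ fs ∧ neg ≥ fs
          · rw [if_pos hbr]
            rw [selB_nil labels fs (a+1) m le_rfl (by rw [hcnt1]; omega) (by rw [hcnt0]; omega)]
            simp
          · rw [if_neg hbr]
            exact ih (a+1) pos neg _ _ _ (by omega)
              (by rw [hcnt1]; omega) (by rw [hcnt0]; push_cast; omega)
      · have hcnt0 : (labels.take (a+1)).count 0 = (labels.take a).count 0 := by
          rw [count_take_succ labels ha 0, if_neg h0]; omega
        rw [if_neg (fun h => h0 h.1)]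
        have hsel_a : ¬ selB labels fs a = true := by
          simp only [selB, Bool.or_eq_true, Bool.and_eq_true, beq_iff_eq, decide_eq_true_eq]
          rintro (⟨h, _⟩ | ⟨h, _⟩)
          · exact h1 h
          · exact h0 h
        rw [List.filter_cons_of_neg hsel_a]
        by_cases hbr : pos ≥ fs ∧ neg ≥ fs
        · rw [if_pos hbr]
          rw [selB_nil labels fs (a+1) m le_rfl (by rw [hcnt1]; omega) (by rw [hcnt0]; omega)]
          simp
        · rw [if_neg hbr]
          exact ih (a+1) pos neg _ _ _ (by omega)
            (by rw [hcnt1]; omega) (by rw [hcnt0]; omega)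

theorem few_shot_sampler_spec : Claim_equal_few_shot_sampler := by
  intro uttrs labels uttr_masks fs _hDom _hPre
  unfold Spec_few_shot_sampler few_shot_sampler
  rw [alt_eq, PySem.List.pyRange_zero_natCast, List.range_eq_range',
      fssA_go_eq uttrs labels uttr_masks fs labels.length 0 0 0 [] [] [] (by omega)
        (by simp only [List.take_zero, List.count_nil, Nat.cast_zero]; omega)
        (by simp only [List.take_zero, List.count_nil, Nat.cast_zero]; omega)]
  simp
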